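-- pv_equiv track=rewrite | github.com/allanlzee/Python-ICS | Encrypt.py | char_filter
-- ===== SOURCE A (Python) =====
-- def char_filter(message: str) -> str:
--     """Filters out all non-letter characters from message, which is a string
--     with letters that have all been capitalized.
--
--     >>> char_filter("IIIHDHSN&(#^@*")
--     IIIHD HSN
--
--     """
--
--     filtered_chars = []
--
--     filtered_str = ""
--
--
--     for i in range(len(message)):
--         # Append letters to filtered string.
--         if "A" <= message[i] <= "Z":
--             filtered_chars.append(message[i])
--
--     for i in range(len(filtered_chars)):
--         if i % 5 == 0 and i != 0:
--             filtered_str += " "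
--
--         filtered_str += filtered_chars[i]
--
--     return filtered_str
-- ===== SOURCE B (Python) =====
-- def char_filter(message: str) -> str:
--     filtered = [c for c in message if "A" <= c <= "Z"]
--     blocks = []
--     while filtered:
--         blocks.append("".join(filtered[:5]))
--         filtered = filtered[5:]
--     return " ".join(blocks)
-- ===== Notes on version B (the rewrite author's own statement) =====
-- stated objective: simpler
-- what changed: A counts indices and inserts a space when i % 5 == 0 and i != 0 while walking the filtered letters one by one; B filters once with a comprehension and then chunks the result by slicing five letters at a time, joining the blocks with a single space.
import Mathlib
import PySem

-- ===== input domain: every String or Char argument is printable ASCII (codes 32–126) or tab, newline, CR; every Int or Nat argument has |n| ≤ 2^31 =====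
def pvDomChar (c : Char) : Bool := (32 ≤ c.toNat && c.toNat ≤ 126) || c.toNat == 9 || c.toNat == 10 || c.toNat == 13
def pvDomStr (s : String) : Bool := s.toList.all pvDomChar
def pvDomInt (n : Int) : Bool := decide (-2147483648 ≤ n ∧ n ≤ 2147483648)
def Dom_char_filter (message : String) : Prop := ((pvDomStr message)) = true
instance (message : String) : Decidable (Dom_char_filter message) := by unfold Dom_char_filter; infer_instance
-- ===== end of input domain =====

-- B replaces A's char-by-char modulo-counting space insertion by a slice-based chunking loop ([:5] / [5:]) joined with " ": a different decomposition, same cost; the filtering pass becomes a single filter.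


-- ===== PORT A =====
-- A: first loop collects the capital letters by index; second loop walks them by index,
-- inserting ' ' whenever i % 5 == 0 and i != 0.  The Python string accumulator is a List Char,
-- turned into a String at the end.
def char_filter (message : String) : String :=
  let filteredChars : List Char :=
    (PySem.List.pyRange 0 (PySem.Str.len message) 1).foldl
      (fun acc i =>
        if 'A' ≤ PySem.List.pyGetD message.toList i ' ' ∧
           PySem.List.pyGetD message.toList i ' ' ≤ 'Z'
        then acc ++ [PySem.List.pyGetD message.toList i ' ']
        else acc) []
  let filteredStr : List Char :=
    (PySem.List.pyRange 0 (filteredChars.length : Int) 1).foldl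
      (fun acc i =>
        (if PySem.Int.mod i 5 = 0 ∧ i ≠ 0 then acc ++ [' '] else acc)
          ++ [PySem.List.pyGetD filteredChars i ' ']) []
  String.mk filteredStr

-- ===== PORT B =====
-- B's while loop: peel off the first five filtered letters per iteration (slices [:5] / [5:])
def pvChunks5 (l : List Char) : List (List Char) :=
  if _h : l = [] then []
  else PySem.List.slice l none (some 5) :: pvChunks5 (PySem.List.slice l (some 5) none)
termination_by l.length
decreasing_by
  rw [PySem.List.slice_from l (by omega : (0:Int) ≤ 5)]
  cases l with
  | nil => exact absurd rfl _h
  | cons c t => simp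

def char_filter_alt (message : String) : String :=
  let filtered := message.toList.filter (fun c => decide ('A' ≤ c ∧ c ≤ 'Z'))
  String.mk (PySem.Chars.join [' '] (pvChunks5 filtered))

-- ===== PRECONDITION & SPEC =====
def Spec_char_filter (message : String) (out : String) : Prop := out = char_filter_alt message
instance (message : String) (out : String) : Decidable (Spec_char_filter message out) := by unfold Spec_char_filter; infer_instance

-- ===== CLAIM (what is proved, stated in full; the proofs are below) =====
def Claim_equal_char_filter : Prop := ∀ (message : String), Dom_char_filter message → Spec_char_filter message (char_filter message)

-- ===== LEMMAS AND PROOFS =====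

-- A's second loop, written as structural recursion carrying the absolute index
def pvG (i : Int) : List Char → List Char
  | [] => []
  | c :: t => (if PySem.Int.mod i 5 = 0 ∧ i ≠ 0 then [' '] else []) ++ c :: pvG (i + 1) t

theorem pvG_bridge (L : List Char) (d : Nat) :
    ∀ (j : Nat), j + d = L.length → ∀ (acc : List Char),
    (PySem.List.pyRange (j : Int) (L.length : Int) 1).foldl
      (fun acc i =>
        (if PySem.Int.mod i 5 = 0 ∧ i ≠ 0 then acc ++ [' '] else acc)
          ++ [PySem.List.pyGetD L i ' ']) acc
    = acc ++ pvG (j : Int) (L.drop j) := by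
  induction d with
  | zero =>
    intro j hj acc
    rw [PySem.List.pyRange_one_eq_nil (by omega)]
    simp [List.drop_of_length_le (by omega : L.length ≤ j), pvG]
  | succ d ih =>
    intro j hj acc
    have hjlt : j < L.length := by omega
    rw [PySem.List.pyRange_one_cons (by exact_mod_cast hjlt)]
    have hcast : ((j : Int) + 1) = ((j + 1 : Nat) : Int) := by push_cast; ring
    rw [List.foldl_cons, hcast, ih (j + 1) (by omega)]
    rw [PySem.List.pyGetD_eq_getElem L ' ' (by omega) (by exact_mod_cast hjlt)]
    rw [List.drop_eq_getElem_cons hjlt]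
    simp only [pvG, Int.toNat_natCast]
    split
    · simp
    · simp

theorem pvMod5 (k : Nat) (r : Int) (h0 : 0 ≤ r) (h5 : r < 5) :
    PySem.Int.mod (5 * (k : Int) + r) 5 = r := by
  rw [PySem.Int.mod_eq_emod_of_pos (by omega)]
  omega

theorem pvG_nil (i : Int) : pvG i [] = [] := rfl

theorem pvG_head (k : Nat) (c : Char) (t : List Char) :
    pvG (5 * (k : Int)) (c :: t)
    = (if k = 0 then [] else [' ']) ++ c :: pvG (5 * (k : Int) + 1) t := by
  simp only [pvG]
  by_cases hk : k = 0
  · subst hk; rw [if_neg (by simp)]; simp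
  · rw [if_pos ⟨by simpa using pvMod5 k 0 (by omega) (by omega), by simp [hk]⟩]
    simp [hk]

theorem pvG_skip (k : Nat) (r : Int) (h0 : 1 ≤ r) (h5 : r < 5) (c : Char) (t : List Char) :
    pvG (5 * (k : Int) + r) (c :: t) = c :: pvG (5 * (k : Int) + r + 1) t := by
  simp only [pvG]
  rw [if_neg (by rw [pvMod5 k r (by omega) h5]; omega)]
  simp

theorem pvChunks5_nil : pvChunks5 [] = [] := by rw [pvChunks5]; simp

theorem pvChunks5_cons (l : List Char) (h : l ≠ []) :
    pvChunks5 l = l.take 5 :: pvChunks5 (l.drop 5) := by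
  rw [pvChunks5]
  simp [h, PySem.List.slice_to l (by omega : (0:Int) ≤ 5),
        PySem.List.slice_from l (by omega : (0:Int) ≤ 5)]

-- pvG at an index 5·k equals join-of-chunks, preceded by a space when k ≠ 0 and l ≠ []
theorem pvG_chunks (n : Nat) : ∀ (l : List Char), l.length ≤ n → ∀ (k : Nat),
    pvG (5 * (k : Int)) l
    = (if k = 0 ∨ l = [] then [] else [' ']) ++ PySem.Chars.join [' '] (pvChunks5 l) := by
  induction n with
  | zero =>
    intro l hl k
    have : l = [] := by cases l <;> simp_all
    subst this
    simp [pvG_nil, pvChunks5_nil, PySem.Chars.join_nil]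
  | succ n ih =>
    intro l hl k
    match l with
    | [] => simp [pvG_nil, pvChunks5_nil, PySem.Chars.join_nil]
    | [a] =>
      rw [pvG_head, pvG_nil, pvChunks5_cons _ (by simp)]
      simp [pvChunks5_nil, PySem.Chars.join_singleton]
    | [a, b] =>
      rw [pvG_head, pvG_skip k 1 (by omega) (by omega), pvG_nil,
          pvChunks5_cons _ (by simp)]
      simp [pvChunks5_nil, PySem.Chars.join_singleton]
    | [a, b, c] =>
      rw [pvG_head, pvG_skip k 1 (by omega) (by omega),
          show 5*(k:Int)+1+1 = 5*(k:Int)+2 by ring,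
          pvG_skip k 2 (by omega) (by omega), pvG_nil,
          pvChunks5_cons _ (by simp)]
      simp [pvChunks5_nil, PySem.Chars.join_singleton]
    | [a, b, c, d] =>
      rw [pvG_head, pvG_skip k 1 (by omega) (by omega),
          show 5*(k:Int)+1+1 = 5*(k:Int)+2 by ring,
          pvG_skip k 2 (by omega) (by omega),
          show 5*(k:Int)+2+1 = 5*(k:Int)+3 by ring,
          pvG_skip k 3 (by omega) (by omega), pvG_nil,
          pvChunks5_cons _ (by simp)]
      simp [pvChunks5_nil, PySem.Chars.join_singleton]
    | a :: b :: c :: d :: e :: rest =>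
      rw [pvG_head, pvG_skip k 1 (by omega) (by omega),
          show 5*(k:Int)+1+1 = 5*(k:Int)+2 by ring,
          pvG_skip k 2 (by omega) (by omega),
          show 5*(k:Int)+2+1 = 5*(k:Int)+3 by ring,
          pvG_skip k 3 (by omega) (by omega),
          show 5*(k:Int)+3+1 = 5*(k:Int)+4 by ring,
          pvG_skip k 4 (by omega) (by omega),
          show 5*(k:Int)+4+1 = 5*((k+1:Nat):Int) by push_cast; ring,
          ih rest (by simp at hl ⊢; omega) (k+1),
          pvChunks5_cons (a::b::c::d::e::rest) (by simp)]
      simp only [List.take_succ_cons, List.take_zero, List.drop_succ_cons, List.drop_zero]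
      by_cases hr : rest = []
      · subst hr
        simp [pvChunks5_nil, PySem.Chars.join_singleton]
      · rw [pvChunks5_cons rest hr, PySem.Chars.join_cons_cons]
        simp [hr]

-- A's first loop is exactly the filter B computes
theorem pvFilter_loop (message : String) :
    (PySem.List.pyRange 0 (PySem.Str.len message) 1).foldl
      (fun acc i =>
        if 'A' ≤ PySem.List.pyGetD message.toList i ' ' ∧
           PySem.List.pyGetD message.toList i ' ' ≤ 'Z'
        then acc ++ [PySem.List.pyGetD message.toList i ' ']
        else acc) []
    = message.toList.filter (fun c => decide ('A' ≤ c ∧ c ≤ 'Z')) := by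
  rw [PySem.Str.len_eq]
  rw [PySem.List.foldl_pyRange_zero_pyGetD' message.toList ' '
        (fun acc c => if 'A' ≤ c ∧ c ≤ 'Z' then acc ++ [c] else acc) []]
  have : (fun (acc : List Char) (c : Char) => if 'A' ≤ c ∧ c ≤ 'Z' then acc ++ [c] else acc)
       = (fun acc c => if (fun x => decide ('A' ≤ x ∧ x ≤ 'Z')) c = true then acc ++ [id c] else acc) := by
    funext acc c; simp
  rw [this, PySem.List.foldl_append_if]
  simp

-- ===== VERDICT (by name: the statement is the Claim_ definition above) =====
theorem char_filter_spec : Claim_equal_char_filter := by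
  intro message _hdom
  unfold Spec_char_filter char_filter char_filter_alt
  dsimp only
  rw [pvFilter_loop]
  set l := message.toList.filter (fun c => decide ('A' ≤ c ∧ c ≤ 'Z')) with hl
  have hb := pvG_bridge l l.length 0 (by omega) []
  simp only [Nat.cast_zero, List.drop_zero, List.nil_append] at hb
  rw [hb]
  have hc := pvG_chunks l.length l (le_refl _) 0
  simp only [Nat.cast_zero, mul_zero, eq_self_iff_true, true_or, if_pos, List.nil_append] at hc
  rw [hc]
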